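-- pv_equiv track=rewrite | github.com/lvaughn/advent | 2023/22/part_1.py | find_collapse
-- ===== SOURCE A (Python) =====
-- def find_collapse(block_no, needs):
--     last_count = 0
--     currently_deleted = set([block_no])
--     while len(currently_deleted) != last_count:
--         last_count = len(currently_deleted)
--         for blk in needs:
--             if len(needs[blk] - currently_deleted) == 0:
--                 currently_deleted.add(blk)
--
--     return last_count - 1
-- ===== SOURCE B (Python) =====
-- def find_collapse(block_no, needs):
--     # Kahn-style propagation: build a reverse (supporter -> dependents) index once,
--     # keep the still-missing supporters of each block as a shrinking set, and push a
--     # block exactly when its last missing supporter is deleted.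
--     pend = {}
--     dependents = {}
--     for k, v in needs.items():
--         sv = set(v)
--         pend[k] = sv
--         for s in sv:
--             dependents.setdefault(s, []).append(k)
--     deleted = {block_no}
--     stack = [block_no]
--     for k, sv in pend.items():
--         if not sv and k not in deleted:
--             deleted.add(k)
--             stack.append(k)
--     while stack:
--         x = stack.pop()
--         for k in dependents.get(x, []):
--             s = pend[k]
--             s.discard(x)
--             if not s and k not in deleted:
--                 deleted.add(k)
--                 stack.append(k)
--     return len(deleted) - 1
-- ===== Notes on version B (the rewrite author's own statement) =====
-- stated objective: alternative
-- what changed: Replaces A's repeated full-dict sweeps (re-testing every block's full supporter set until the deleted-set size stabilises) with a single Kahn-style worklist propagation over a precomputed reverse supporter-to-dependents index with shrinking pending-supporter sets.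
import Mathlib
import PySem

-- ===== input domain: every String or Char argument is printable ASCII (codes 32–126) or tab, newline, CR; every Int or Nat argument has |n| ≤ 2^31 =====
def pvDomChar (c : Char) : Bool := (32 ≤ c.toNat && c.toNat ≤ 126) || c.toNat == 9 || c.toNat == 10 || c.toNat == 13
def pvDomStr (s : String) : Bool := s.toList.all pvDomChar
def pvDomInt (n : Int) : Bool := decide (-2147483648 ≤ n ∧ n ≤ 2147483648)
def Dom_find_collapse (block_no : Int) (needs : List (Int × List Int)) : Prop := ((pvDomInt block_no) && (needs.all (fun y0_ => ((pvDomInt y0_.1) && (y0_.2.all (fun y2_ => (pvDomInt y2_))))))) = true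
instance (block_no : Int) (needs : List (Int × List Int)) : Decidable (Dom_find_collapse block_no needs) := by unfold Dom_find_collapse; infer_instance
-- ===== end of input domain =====

-- B replaces A's repeated full-dict sweeps (stabilised by a size check) with a one-pass
-- Kahn-style propagation over a reverse supporter→dependents index; equal return value.

-- ===== PORT A =====
-- one 'for blk in needs' sweep: add blk when needs[blk] - currently_deleted is empty
def pvSweepA (items : List (Int × List Int)) (cd : PySem.Set Int) : PySem.Set Int :=
  items.foldl (fun cd p =>
    if PySem.Set.len (PySem.Set.diff (PySem.Set.ofList p.2) cd) = 0
    then PySem.Set.add cd p.1 else cd) cd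

-- the 'while len(currently_deleted) != last_count' loop; fuel only makes the recursion
-- structural: the loop provably stabilises within items.length + 2 rounds
def pvLoopA (items : List (Int × List Int)) : Nat → Int → PySem.Set Int → PySem.Set Int
  | 0, _, cd => cd
  | f+1, last, cd =>
    if PySem.Set.len cd ≠ last then pvLoopA items f (PySem.Set.len cd) (pvSweepA items cd)
    else cd

def find_collapse (block_no : Int) (needs : List (Int × List Int)) : Int :=
  let items := (PySem.Dict.ofList needs).items
  PySem.Set.len (pvLoopA items (items.length + 2) 0 (PySem.Set.ofList [block_no])) - 1

-- ===== PORT B =====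
-- build pend = {k: set(v)} and dependents = {s: [k…]} in one pass over needs.items()
def pvBuild (items : List (Int × List Int)) :
    PySem.Dict Int (PySem.Set Int) × PySem.Dict Int (List Int) :=
  items.foldl (fun st p =>
    let sv := PySem.Set.ofList p.2
    (st.1.insert p.1 sv,
     sv.foldl (fun d s => d.modify s [] (· ++ [p.1])) st.2))
    (PySem.Dict.empty, PySem.Dict.empty)

-- body of the 'for k, sv in pend.items(): if not sv and k not in deleted: …' seeding loop
def pvSeedF (st : PySem.Set Int × List Int) (q : Int × PySem.Set Int) :
    PySem.Set Int × List Int :=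
  if q.2 = ([] : List Int) ∧ PySem.Set.contains st.1 q.1 = false then
    (PySem.Set.add st.1 q.1, st.2 ++ [q.1])
  else st

def pvSeed (block_no : Int) (pitems : List (Int × PySem.Set Int)) : PySem.Set Int × List Int :=
  pitems.foldl pvSeedF (PySem.Set.ofList [block_no], [block_no])

-- 'for k in dependents.get(x, []): s = pend[k]; s.discard(x); …' (k is always a key of
-- pend here, so getD is exact)
def pvRelax (x : Int) : List Int → PySem.Dict Int (PySem.Set Int) → PySem.Set Int → List Int →
    PySem.Dict Int (PySem.Set Int) × PySem.Set Int × List Int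
  | [], pd, deleted, stack => (pd, deleted, stack)
  | k :: ks, pd, deleted, stack =>
    let s' := PySem.Set.discard (pd.getD k []) x
    let pd' := pd.insert k s'
    if s' = ([] : List Int) ∧ PySem.Set.contains deleted k = false then
      pvRelax x ks pd' (PySem.Set.add deleted k) (stack ++ [k])
    else pvRelax x ks pd' deleted stack

-- 'while stack: x = stack.pop(); …'; fuel only makes the recursion structural: the
-- stack provably empties within items.length + 2 pops
def pvKahn (dep : PySem.Dict Int (List Int)) : Nat → PySem.Dict Int (PySem.Set Int) → PySem.Set Int → List Int → PySem.Set Int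
  | 0, _, deleted, _ => deleted
  | f+1, pd, deleted, stack =>
    if h : stack = [] then deleted
    else
      let x := stack.getLast h
      let st := pvRelax x (dep.getD x []) pd deleted stack.dropLast
      pvKahn dep f st.1 st.2.1 st.2.2

def find_collapse_alt (block_no : Int) (needs : List (Int × List Int)) : Int :=
  let items := (PySem.Dict.ofList needs).items
  let bd := pvBuild items
  let seeded := pvSeed block_no bd.1.items
  PySem.Set.len (pvKahn bd.2 (items.length + 2) bd.1 seeded.1 seeded.2) - 1

-- ===== PRECONDITION & SPEC =====
def Spec_find_collapse (block_no : Int) (needs : List (Int × List Int)) (out : Int) : Prop := out = find_collapse_alt block_no needs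
instance (block_no : Int) (needs : List (Int × List Int)) (out : Int) : Decidable (Spec_find_collapse block_no needs out) := by unfold Spec_find_collapse; infer_instance

-- ===== CLAIM (what is proved, stated in full; the proofs are below) =====
def Claim_equal_find_collapse : Prop := ∀ (block_no : Int) (needs : List (Int × List Int)), Dom_find_collapse block_no needs → Spec_find_collapse block_no needs (find_collapse block_no needs)

-- ===== LEMMAS AND PROOFS =====

-- S is closed under the collapse rule induced by the (deduplicated) dict items
def ClosedU (items : List (Int × List Int)) (S : List Int) : Prop :=
  ∀ p ∈ items, (∀ x ∈ p.2, x ∈ S) → p.1 ∈ S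

theorem pv_uniq_val {items : List (Int × List Int)} (h : (items.map (·.1)).Nodup)
    {k : Int} {v w : List Int} (hv : (k, v) ∈ items) (hw : (k, w) ∈ items) : v = w := by
  induction items with
  | nil => simp at hv
  | cons q t ih =>
    rw [List.map_cons, List.nodup_cons] at h
    rcases List.mem_cons.1 hv with hv1 | hv1 <;> rcases List.mem_cons.1 hw with hw1 | hw1
    · rw [← hv1] at hw1
      injection hw1 with h1 h2
      exact h2.symm
    · exfalso; exact h.1 (List.mem_map.2 ⟨(k, w), hw1, by rw [← hv1]⟩)
    · exfalso; exact h.1 (List.mem_map.2 ⟨(k, v), hv1, by rw [← hw1]⟩)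
    · exact ih h.2 hv1 hw1

theorem pv_not_mem_of_contains_false {s : PySem.Set Int} {x : Int}
    (h : PySem.Set.contains s x = false) : x ∉ s := by
  intro hx
  rw [(PySem.Set.contains_iff s x).2 hx] at h
  cases h

theorem pv_mem_of_contains_ne_false {s : PySem.Set Int} {x : Int}
    (h : ¬ PySem.Set.contains s x = false) : x ∈ s := by
  cases hb : PySem.Set.contains s x with
  | false => exact absurd hb h
  | true => exact (PySem.Set.contains_iff s x).1 hb

-- ---------- A side ----------

theorem pv_sweepA_step_prefix (cd : PySem.Set Int) (p : Int × List Int) :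
    cd <+: (if PySem.Set.len (PySem.Set.diff (PySem.Set.ofList p.2) cd) = 0
      then PySem.Set.add cd p.1 else cd) := by
  split
  · rw [PySem.Set.add_eq_ite]
    split
    · exact List.prefix_rfl
    · exact ⟨[p.1], rfl⟩
  · exact List.prefix_rfl

theorem pv_sweepA_prefix (items : List (Int × List Int)) : ∀ cd, cd <+: pvSweepA items cd := by
  induction items with
  | nil => intro cd; exact List.prefix_rfl
  | cons p t ih =>
    intro cd
    exact (pv_sweepA_step_prefix cd p).trans (ih _)

theorem pv_sweepA_nodup (items : List (Int × List Int)) :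
    ∀ cd : PySem.Set Int, cd.Nodup → (pvSweepA items cd).Nodup := by
  induction items with
  | nil => intro cd h; exact h
  | cons p t ih =>
    intro cd h
    rw [show pvSweepA (p :: t) cd = pvSweepA t
        (if PySem.Set.len (PySem.Set.diff (PySem.Set.ofList p.2) cd) = 0
         then PySem.Set.add cd p.1 else cd) from rfl]
    apply ih
    by_cases hc : PySem.Set.len (PySem.Set.diff (PySem.Set.ofList p.2) cd) = 0
    · rw [if_pos hc]; exact PySem.Set.nodup_add _ _ h
    · rw [if_neg hc]; exact h

theorem pv_sweepA_mem (items : List (Int × List Int)) :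
    ∀ cd : PySem.Set Int, ∀ x ∈ pvSweepA items cd, x ∈ cd ∨ x ∈ items.map (·.1) := by
  induction items with
  | nil => intro cd x hx; exact Or.inl hx
  | cons p t ih =>
    intro cd x hx
    rw [show pvSweepA (p :: t) cd = pvSweepA t
        (if PySem.Set.len (PySem.Set.diff (PySem.Set.ofList p.2) cd) = 0
         then PySem.Set.add cd p.1 else cd) from rfl] at hx
    rcases ih _ x hx with h | h
    · by_cases hc : PySem.Set.len (PySem.Set.diff (PySem.Set.ofList p.2) cd) = 0
      · rw [if_pos hc] at h
        rcases (PySem.Set.mem_add _ _ _).1 h with h | h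
        · exact Or.inl h
        · exact Or.inr (by simp [h])
      · rw [if_neg hc] at h
        exact Or.inl h
    · exact Or.inr (List.mem_cons_of_mem _ h)

theorem pv_diff_nil_of_subset {v : List Int} {cd : PySem.Set Int}
    (h : ∀ x ∈ v, x ∈ cd) : PySem.Set.diff (PySem.Set.ofList v) cd = [] := by
  rw [List.eq_nil_iff_forall_not_mem]
  intro y hy
  rw [PySem.Set.mem_diff] at hy
  exact hy.2 (h y ((PySem.Set.mem_ofList _ _).1 hy.1))

theorem pv_subset_of_diff_len_zero {v : List Int} {cd : PySem.Set Int}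
    (h : PySem.Set.len (PySem.Set.diff (PySem.Set.ofList v) cd) = 0) : ∀ x ∈ v, x ∈ cd := by
  intro x hx
  by_contra hxc
  have hm : x ∈ PySem.Set.diff (PySem.Set.ofList v) cd :=
    (PySem.Set.mem_diff _ _ _).2 ⟨(PySem.Set.mem_ofList _ _).2 hx, hxc⟩
  unfold PySem.Set.len at h
  have hlen : (PySem.Set.diff (PySem.Set.ofList v) cd).length = 0 := by exact_mod_cast h
  rw [List.length_eq_zero_iff] at hlen
  rw [hlen] at hm
  simp at hm

theorem pv_sweepA_sound (items : List (Int × List Int)) (T : List Int)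
    (hcl : ∀ p ∈ items, (∀ x ∈ p.2, x ∈ T) → p.1 ∈ T) :
    ∀ cd : PySem.Set Int, (∀ x ∈ cd, x ∈ T) → ∀ x ∈ pvSweepA items cd, x ∈ T := by
  induction items with
  | nil => intro cd h x hx; exact h x hx
  | cons p t ih =>
    intro cd h x hx
    have hstep : ∀ y ∈ (if PySem.Set.len (PySem.Set.diff (PySem.Set.ofList p.2) cd) = 0
        then PySem.Set.add cd p.1 else cd), y ∈ T := by
      intro y hy
      by_cases hc : PySem.Set.len (PySem.Set.diff (PySem.Set.ofList p.2) cd) = 0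
      · rw [if_pos hc] at hy
        rcases (PySem.Set.mem_add _ _ _).1 hy with hcd | hp
        · exact h y hcd
        · subst hp
          exact hcl p (List.mem_cons_self)
            (fun z hz => h z (pv_subset_of_diff_len_zero hc z hz))
      · rw [if_neg hc] at hy
        exact h y hy
    exact ih (fun q hq => hcl q (List.mem_cons_of_mem _ hq)) _ hstep x hx

theorem pv_sweepA_fix_closed (items : List (Int × List Int)) :
    ∀ cd : PySem.Set Int, pvSweepA items cd = cd →
      ∀ p ∈ items, (∀ x ∈ p.2, x ∈ cd) → p.1 ∈ cd := by
  induction items with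
  | nil => intro cd _ p hp; simp at hp
  | cons q t ih =>
    intro cd hfix p hp hsub
    have h1 : cd <+: (if PySem.Set.len (PySem.Set.diff (PySem.Set.ofList q.2) cd) = 0
        then PySem.Set.add cd q.1 else cd) := pv_sweepA_step_prefix cd q
    have h2 : (if PySem.Set.len (PySem.Set.diff (PySem.Set.ofList q.2) cd) = 0
        then PySem.Set.add cd q.1 else cd) <+: pvSweepA (q :: t) cd := pv_sweepA_prefix t _
    rw [hfix] at h2
    have hstep : (if PySem.Set.len (PySem.Set.diff (PySem.Set.ofList q.2) cd) = 0
        then PySem.Set.add cd q.1 else cd) = cd :=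
      h2.eq_of_length (le_antisymm h2.length_le h1.length_le)
    have htail : pvSweepA t cd = cd := by
      have hc : pvSweepA (q :: t) cd = pvSweepA t (if PySem.Set.len (PySem.Set.diff (PySem.Set.ofList q.2) cd) = 0
          then PySem.Set.add cd q.1 else cd) := rfl
      rw [hstep] at hc
      rw [← hc, hfix]
    rcases List.mem_cons.1 hp with hpq | hpt
    · subst hpq
      have hd : PySem.Set.len (PySem.Set.diff (PySem.Set.ofList p.2) cd) = 0 := by
        rw [pv_diff_nil_of_subset hsub]; rfl
      rw [if_pos hd] at hstep
      rw [PySem.Set.add_eq_ite] at hstep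
      split at hstep
      · assumption
      · exfalso
        have := congrArg List.length hstep
        simp at this
    · exact ih cd htail p hpt hsub

theorem pv_loopA_of_fix (items : List (Int × List Int)) (cd : PySem.Set Int) (f : Nat) :
    pvLoopA items f (PySem.Set.len cd) cd = cd := by
  cases f with
  | zero => rfl
  | succ f => simp [pvLoopA]

theorem pv_loopA_spec (items : List (Int × List Int)) (bn : Int) :
    ∀ (f : Nat) (last : Int) (cd : PySem.Set Int),
    cd.Nodup →
    (∀ x ∈ cd, x ∈ bn :: items.map (·.1)) →
    (PySem.Set.len cd = last → pvSweepA items cd = cd) →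
    items.length + 2 ≤ f + cd.length →
    (pvLoopA items f last cd).Nodup ∧
    (∀ x ∈ cd, x ∈ pvLoopA items f last cd) ∧
    pvSweepA items (pvLoopA items f last cd) = pvLoopA items f last cd ∧
    (∀ T, ClosedU items T → (∀ x ∈ cd, x ∈ T) → ∀ x ∈ pvLoopA items f last cd, x ∈ T) := by
  intro f
  induction f with
  | zero =>
    intro last cd h1 h2 _ hf
    exfalso
    have hle := (List.subperm_of_subset h1 (fun x hx => h2 x hx)).length_le
    simp only [List.length_cons, List.length_map] at hle
    omega
  | succ f ih =>
    intro last cd h1 h2 hI hf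
    by_cases hlc : PySem.Set.len cd = last
    · have hr : pvLoopA items (f+1) last cd = cd := by
        simp only [pvLoopA]
        rw [if_neg (fun hcon => hcon hlc)]
      rw [hr]
      exact ⟨h1, fun x hx => hx, hI hlc, fun T _ hT => hT⟩
    · have hstep : pvLoopA items (f+1) last cd
          = pvLoopA items f (PySem.Set.len cd) (pvSweepA items cd) := by
        simp only [pvLoopA]
        rw [if_pos hlc]
      by_cases hfix : pvSweepA items cd = cd
      · rw [hstep, hfix, pv_loopA_of_fix]
        exact ⟨h1, fun x hx => hx, hfix, fun T _ hT => hT⟩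
      · have hpre := pv_sweepA_prefix items cd
        have hlt : cd.length < (pvSweepA items cd).length := by
          rcases lt_or_eq_of_le hpre.length_le with h | h
          · exact h
          · exact absurd (hpre.eq_of_length h).symm hfix
        have hmem : ∀ x ∈ pvSweepA items cd, x ∈ bn :: items.map (·.1) := by
          intro x hx
          rcases pv_sweepA_mem items cd x hx with h | h
          · exact h2 x h
          · exact List.mem_cons_of_mem _ h
        have hI' : PySem.Set.len (pvSweepA items cd) = PySem.Set.len cd →
            pvSweepA items (pvSweepA items cd) = pvSweepA items cd := by
          intro hlen
          exfalso
          apply hfix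
          have hl : cd.length = (pvSweepA items cd).length := by
            unfold PySem.Set.len at hlen
            omega
          exact (hpre.eq_of_length hl).symm
        obtain ⟨r1, r2, r3, r4⟩ := ih (PySem.Set.len cd) (pvSweepA items cd)
          (pv_sweepA_nodup items cd h1) hmem hI' (by omega)
        rw [hstep]
        refine ⟨r1, fun x hx => r2 x (hpre.subset hx), r3, fun T hT hcd => r4 T hT ?_⟩
        exact fun x hx => pv_sweepA_sound items T hT cd hcd x hx

-- ---------- B side: build phase ----------

theorem pv_foldl_prod {α β γ : Type} (l : List γ) (g : α → γ → α) (h : β → γ → β) :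
    ∀ (a : α) (b : β),
      (l.foldl (fun st p => (g st.1 p, h st.2 p)) (a, b)) = (l.foldl g a, l.foldl h b) := by
  induction l with
  | nil => intro a b; rfl
  | cons p t ih => intro a b; exact ih (g a p) (h b p)

def pvDepStep (d : PySem.Dict Int (List Int)) (p : Int × List Int) : PySem.Dict Int (List Int) :=
  (PySem.Set.ofList p.2).foldl (fun d s => d.modify s [] (· ++ [p.1])) d

theorem pv_build_eq (items : List (Int × List Int)) : pvBuild items =
    (items.foldl (fun d p => d.insert p.1 (PySem.Set.ofList p.2)) PySem.Dict.empty,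
     items.foldl pvDepStep PySem.Dict.empty) := by
  unfold pvBuild pvDepStep
  exact pv_foldl_prod items
    (fun d p => d.insert p.1 (PySem.Set.ofList p.2))
    (fun d p => (PySem.Set.ofList p.2).foldl (fun d s => d.modify s [] (· ++ [p.1])) d)
    PySem.Dict.empty PySem.Dict.empty

theorem pv_build_fst_items (items : List (Int × List Int)) (h : (items.map (·.1)).Nodup) :
    (pvBuild items).1.items = items.map (fun p => (p.1, PySem.Set.ofList p.2)) := by
  rw [pv_build_eq]
  have hf := PySem.Dict.items_foldl_insert_fresh (l := items) (k := fun p => p.1)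
    (v := fun p => PySem.Set.ofList p.2) (d := PySem.Dict.empty)
    (fun a _ => PySem.Dict.contains_empty _) h
  simpa using hf

theorem pv_dep_inner_mem (p : Int × List Int) (d0 : PySem.Dict Int (List Int)) (x k : Int) :
    k ∈ (pvDepStep d0 p).getD x []
      ↔ k ∈ d0.getD x [] ∨ (x ∈ p.2 ∧ k = p.1) := by
  unfold pvDepStep
  rw [show (PySem.Set.ofList p.2).foldl (fun d s => d.modify s [] (· ++ [p.1])) d0
      = List.foldl (fun d (q : Int × Int) => d.modify q.1 [] (· ++ [q.2])) d0
          ((PySem.Set.ofList p.2).map (fun s => (s, p.1))) from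
      (List.foldl_map (f := fun s => (s, p.1))
        (g := fun d (q : Int × Int) => d.modify q.1 [] (· ++ [q.2]))
        (l := PySem.Set.ofList p.2) (init := d0)).symm]
  rw [PySem.Dict.getD_foldl_modify_append]
  simp only [List.mem_append, List.mem_map, List.mem_filter]
  constructor
  · rintro (h | ⟨q, ⟨⟨s, hs, rfl⟩, hq1⟩, rfl⟩)
    · exact Or.inl h
    · simp only [beq_iff_eq] at hq1
      exact Or.inr ⟨(PySem.Set.mem_ofList _ _).1 (hq1 ▸ hs), rfl⟩
  · rintro (h | ⟨hx, hk⟩)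
    · exact Or.inl h
    · exact Or.inr ⟨(x, p.1), ⟨⟨x, (PySem.Set.mem_ofList _ _).2 hx, rfl⟩, by simp⟩, hk.symm⟩

theorem pv_dep_mem_aux (x k : Int) :
    ∀ (its : List (Int × List Int)) (d0 : PySem.Dict Int (List Int)),
    k ∈ (its.foldl pvDepStep d0).getD x [] ↔ k ∈ d0.getD x [] ∨ ∃ p ∈ its, p.1 = k ∧ x ∈ p.2 := by
  intro its
  induction its with
  | nil => intro d0; simp
  | cons p t ih =>
    intro d0
    rw [List.foldl_cons, ih, pv_dep_inner_mem]
    constructor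
    · rintro ((h | ⟨hx, hk⟩) | ⟨q, hq, hk, hx⟩)
      · exact Or.inl h
      · exact Or.inr ⟨p, List.mem_cons_self, hk.symm, hx⟩
      · exact Or.inr ⟨q, List.mem_cons_of_mem _ hq, hk, hx⟩
    · rintro (h | ⟨q, hq, hk, hx⟩)
      · exact Or.inl (Or.inl h)
      · rcases List.mem_cons.1 hq with hqp | hqt
        · subst hqp; exact Or.inl (Or.inr ⟨hx, hk.symm⟩)
        · exact Or.inr ⟨q, hqt, hk, hx⟩

theorem pv_dep_mem (items : List (Int × List Int)) (x k : Int) :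
    k ∈ (pvBuild items).2.getD x [] ↔ ∃ p ∈ items, p.1 = k ∧ x ∈ p.2 := by
  rw [pv_build_eq]
  simpa using pv_dep_mem_aux x k items PySem.Dict.empty

-- ---------- B side: seeding loop ----------

theorem pv_seed_aux (qs : List (Int × PySem.Set Int)) :
    ∀ (d0 : PySem.Set Int) (s0 : List Int), d0 = s0 → d0.Nodup →
    (qs.foldl pvSeedF (d0, s0)).1 = (qs.foldl pvSeedF (d0, s0)).2 ∧
    (qs.foldl pvSeedF (d0, s0)).1.Nodup ∧
    (∀ y ∈ d0, y ∈ (qs.foldl pvSeedF (d0, s0)).1) ∧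
    (∀ q ∈ qs, q.2 = ([] : List Int) → q.1 ∈ (qs.foldl pvSeedF (d0, s0)).1) ∧
    (∀ y ∈ (qs.foldl pvSeedF (d0, s0)).1,
      y ∈ d0 ∨ ∃ q ∈ qs, y = q.1 ∧ q.2 = ([] : List Int)) := by
  induction qs with
  | nil =>
    intro d0 s0 he hn
    exact ⟨he, hn, fun y hy => hy, by simp, fun y hy => Or.inl hy⟩
  | cons q t ih =>
    intro d0 s0 he hn
    rw [List.foldl_cons]
    by_cases hc : q.2 = ([] : List Int) ∧ PySem.Set.contains d0 q.1 = false
    · have hq1 : q.1 ∉ d0 := pv_not_mem_of_contains_false hc.2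
      have hstep : pvSeedF (d0, s0) q = (d0 ++ [q.1], s0 ++ [q.1]) := by
        unfold pvSeedF
        rw [if_pos hc]
        rw [PySem.Set.add_of_not_mem hq1]
      rw [hstep]
      have hnd : (d0 ++ [q.1]).Nodup := by
        rw [← PySem.Set.add_of_not_mem hq1]
        exact PySem.Set.nodup_add _ _ hn
      obtain ⟨c1, c2, c3, c4, c5⟩ := ih (d0 ++ [q.1]) (s0 ++ [q.1]) (by rw [he]) hnd
      refine ⟨c1, c2, ?_, ?_, ?_⟩
      · intro y hy; exact c3 y (by simp [hy])
      · intro r hr h2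
        rcases List.mem_cons.1 hr with hrq | hrt
        · subst hrq; exact c3 r.1 (by simp)
        · exact c4 r hrt h2
      · intro y hy
        rcases c5 y hy with hyd | ⟨r, hrt, hyr, hr2⟩
        · rcases List.mem_append.1 hyd with h | h
          · exact Or.inl h
          · simp only [List.mem_singleton] at h
            exact Or.inr ⟨q, List.mem_cons_self, h, hc.1⟩
        · exact Or.inr ⟨r, List.mem_cons_of_mem _ hrt, hyr, hr2⟩
    · have hstep : pvSeedF (d0, s0) q = (d0, s0) := by
        unfold pvSeedF
        rw [if_neg hc]
      rw [hstep]
      obtain ⟨c1, c2, c3, c4, c5⟩ := ih d0 s0 he hn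
      refine ⟨c1, c2, c3, ?_, ?_⟩
      · intro r hr h2
        rcases List.mem_cons.1 hr with hrq | hrt
        · subst hrq
          have : PySem.Set.contains d0 r.1 ≠ false := fun hb => hc ⟨h2, hb⟩
          exact c3 r.1 (pv_mem_of_contains_ne_false this)
        · exact c4 r hrt h2
      · intro y hy
        rcases c5 y hy with h | ⟨r, hrt, hyr, hr2⟩
        · exact Or.inl h
        · exact Or.inr ⟨r, List.mem_cons_of_mem _ hrt, hyr, hr2⟩

-- ---------- B side: relaxation ----------

theorem pv_relax_spec (items : List (Int × List Int)) (hnk : (items.map (·.1)).Nodup)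
    (x bn : Int) (Q : List Int) :
    ∀ (ks done : List Int) (pd : PySem.Dict Int (PySem.Set Int)) (deleted : PySem.Set Int)
      (stack : List Int),
    (∀ k ∈ ks, ∃ v, (k, v) ∈ items ∧ x ∈ v) →
    deleted.Nodup → stack.Nodup →
    (∀ y, y ∈ deleted ↔ (y ∈ Q ∨ y = x ∨ y ∈ stack)) →
    (∀ y ∈ Q, ¬(y = x ∨ y ∈ stack)) →
    x ∉ stack →
    (∀ p ∈ items, ∀ y, y ∈ pd.getD p.1 [] ↔ (y ∈ p.2 ∧ y ∉ Q ∧ ¬(y = x ∧ p.1 ∈ done))) →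
    (∀ p ∈ items, pd.getD p.1 [] = [] → p.1 ∈ deleted) →
    (∀ T, ClosedU items T → bn ∈ T → ∀ y ∈ deleted, y ∈ T) →
    (∀ y ∈ deleted, y = bn ∨ y ∈ items.map (·.1)) →
    (pvRelax x ks pd deleted stack).2.1.Nodup ∧
    (pvRelax x ks pd deleted stack).2.2.Nodup ∧
    (∀ y, y ∈ (pvRelax x ks pd deleted stack).2.1 ↔
      (y ∈ Q ∨ y = x ∨ y ∈ (pvRelax x ks pd deleted stack).2.2)) ∧
    (∀ y ∈ Q, ¬(y = x ∨ y ∈ (pvRelax x ks pd deleted stack).2.2)) ∧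
    x ∉ (pvRelax x ks pd deleted stack).2.2 ∧
    (∀ p ∈ items, ∀ y, y ∈ (pvRelax x ks pd deleted stack).1.getD p.1 [] ↔
      (y ∈ p.2 ∧ y ∉ Q ∧ ¬(y = x ∧ p.1 ∈ done ++ ks))) ∧
    (∀ p ∈ items, (pvRelax x ks pd deleted stack).1.getD p.1 [] = [] →
      p.1 ∈ (pvRelax x ks pd deleted stack).2.1) ∧
    (∀ T, ClosedU items T → bn ∈ T → ∀ y ∈ (pvRelax x ks pd deleted stack).2.1, y ∈ T) ∧
    (∀ y ∈ (pvRelax x ks pd deleted stack).2.1, y = bn ∨ y ∈ items.map (·.1)) ∧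
    (∀ y ∈ deleted, y ∈ (pvRelax x ks pd deleted stack).2.1) := by
  intro ks
  induction ks with
  | nil =>
    intro done pd deleted stack _ h1 h2 h3 h4 h5 h6 h7 h8 h9
    simp only [pvRelax, List.append_nil]
    exact ⟨h1, h2, h3, h4, h5, h6, h7, h8, h9, fun y hy => hy⟩
  | cons k ks ih =>
    intro done pd deleted stack hks h1 h2 h3 h4 h5 h6 h7 h8 h9
    obtain ⟨v0, hv0, hxv0⟩ := hks k List.mem_cons_self
    have hrec : pvRelax x (k :: ks) pd deleted stack =
        (if PySem.Set.discard (pd.getD k []) x = ([] : List Int) ∧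
            PySem.Set.contains deleted k = false then
          pvRelax x ks (pd.insert k (PySem.Set.discard (pd.getD k []) x))
            (PySem.Set.add deleted k) (stack ++ [k])
        else pvRelax x ks (pd.insert k (PySem.Set.discard (pd.getD k []) x)) deleted stack) := rfl
    have hs' : ∀ y, y ∈ PySem.Set.discard (pd.getD k []) x ↔ (y ∈ v0 ∧ y ∉ Q ∧ y ≠ x) := by
      intro y
      rw [PySem.Set.mem_discard, h6 (k, v0) hv0 y]
      constructor
      · rintro ⟨⟨hy1, hy2, _⟩, hy4⟩
        exact ⟨hy1, hy2, hy4⟩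
      · rintro ⟨hy1, hy2, hy3⟩
        exact ⟨⟨hy1, hy2, fun hh => hy3 hh.1⟩, hy3⟩
    have hpd' : ∀ p ∈ items, ∀ y,
        y ∈ (pd.insert k (PySem.Set.discard (pd.getD k []) x)).getD p.1 [] ↔
        (y ∈ p.2 ∧ y ∉ Q ∧ ¬(y = x ∧ p.1 ∈ done ++ [k])) := by
      intro p hp y
      by_cases hpk : p.1 = k
      · have hv0p : v0 = p.2 := pv_uniq_val hnk hv0 (by rw [← hpk]; exact hp)
        rw [hpk, PySem.Dict.getD_insert_self, hs' y]
        have hkd : k ∈ done ++ [k] := by simp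
        constructor
        · rintro ⟨hy1, hy2, hy3⟩
          exact ⟨hv0p ▸ hy1, hy2, fun hh => hy3 hh.1⟩
        · rintro ⟨hy1, hy2, hy3⟩
          exact ⟨hv0p.symm ▸ hy1, hy2, fun hyx => hy3 ⟨hyx, hkd⟩⟩
      · rw [PySem.Dict.getD_insert_of_ne _ _ _ hpk, h6 p hp y]
        have hik : (p.1 ∈ done ++ [k]) ↔ p.1 ∈ done := by simp [hpk]
        rw [hik]
    by_cases hc : PySem.Set.discard (pd.getD k []) x = ([] : List Int) ∧
        PySem.Set.contains deleted k = false
    · rw [hrec, if_pos hc]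
      have hknot : k ∉ deleted := pv_not_mem_of_contains_false hc.2
      have hxdel : x ∈ deleted := (h3 x).2 (Or.inr (Or.inl rfl))
      have hxk : x ≠ k := fun h => hknot (h ▸ hxdel)
      have hkstack : k ∉ stack := fun h => hknot ((h3 k).2 (Or.inr (Or.inr h)))
      have hadd : PySem.Set.add deleted k = deleted ++ [k] := PySem.Set.add_of_not_mem hknot
      have hv0sub : ∀ z ∈ v0, z ∈ deleted := by
        intro z hz
        by_cases hzq : z ∈ Q
        · exact (h3 z).2 (Or.inl hzq)
        · by_cases hzx : z = x
          · exact hzx ▸ hxdel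
          · exfalso
            have hzmem : z ∈ PySem.Set.discard (pd.getD k []) x := (hs' z).2 ⟨hz, hzq, hzx⟩
            rw [hc.1] at hzmem
            simp at hzmem
      have hks' : ∀ k' ∈ ks, ∃ v, (k', v) ∈ items ∧ x ∈ v :=
        fun k' hk' => hks k' (List.mem_cons_of_mem _ hk')
      have hnd : (PySem.Set.add deleted k).Nodup := PySem.Set.nodup_add _ _ h1
      have hstnd : (stack ++ [k]).Nodup := by
        rw [List.nodup_append]
        refine ⟨h2, List.nodup_singleton _, ?_⟩
        intro a ha b hb
        simp only [List.mem_singleton] at hb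
        subst hb
        exact fun he => hkstack (he ▸ ha)
      have h3' : ∀ y, y ∈ PySem.Set.add deleted k ↔ (y ∈ Q ∨ y = x ∨ y ∈ stack ++ [k]) := by
        intro y
        rw [hadd]
        simp only [List.mem_append, List.mem_singleton]
        rw [h3 y]
        tauto
      have h4' : ∀ y ∈ Q, ¬(y = x ∨ y ∈ stack ++ [k]) := by
        intro y hy
        have hy' := h4 y hy
        have hyk : y ≠ k := fun hh => hknot (hh ▸ (h3 y).2 (Or.inl hy))
        simp only [List.mem_append, List.mem_singleton]
        tauto
      have h5' : x ∉ stack ++ [k] := by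
        simp only [List.mem_append, List.mem_singleton]
        tauto
      have h7' : ∀ p ∈ items,
          (pd.insert k (PySem.Set.discard (pd.getD k []) x)).getD p.1 [] = [] →
          p.1 ∈ PySem.Set.add deleted k := by
        intro p hp hnil
        rw [hadd]
        by_cases hpk : p.1 = k
        · rw [hpk]; simp
        · rw [PySem.Dict.getD_insert_of_ne _ _ _ hpk] at hnil
          simp [h7 p hp hnil]
      have h8' : ∀ T, ClosedU items T → bn ∈ T → ∀ y ∈ PySem.Set.add deleted k, y ∈ T := by
        intro T hT hbnT y hy
        rw [hadd] at hy
        rcases List.mem_append.1 hy with hyd | hyk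
        · exact h8 T hT hbnT y hyd
        · simp only [List.mem_singleton] at hyk
          rw [hyk]
          exact hT (k, v0) hv0 (fun z hz => h8 T hT hbnT z (hv0sub z hz))
      have h9' : ∀ y ∈ PySem.Set.add deleted k, y = bn ∨ y ∈ items.map (·.1) := by
        intro y hy
        rw [hadd] at hy
        rcases List.mem_append.1 hy with hyd | hyk
        · exact h9 y hyd
        · simp only [List.mem_singleton] at hyk
          rw [hyk]
          exact Or.inr (List.mem_map.2 ⟨(k, v0), hv0, rfl⟩)
      obtain ⟨c1, c2, c3, c4, c5, c6, c7, c8, c9, c10⟩ :=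
        ih (done ++ [k]) (pd.insert k (PySem.Set.discard (pd.getD k []) x))
          (PySem.Set.add deleted k) (stack ++ [k])
          hks' hnd hstnd h3' h4' h5' hpd' h7' h8' h9'
      rw [List.append_cons done k ks]
      refine ⟨c1, c2, c3, c4, c5, c6, c7, c8, c9, ?_⟩
      intro y hy
      apply c10
      rw [hadd]
      exact List.mem_append.2 (Or.inl hy)
    · rw [hrec, if_neg hc]
      have hres := ih (done ++ [k]) (pd.insert k (PySem.Set.discard (pd.getD k []) x)) deleted stack
        (fun k' hk' => hks k' (List.mem_cons_of_mem _ hk'))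
        h1 h2 h3 h4 h5 hpd'
        (by
          intro p hp hnil
          by_cases hpk : p.1 = k
          · rw [hpk, PySem.Dict.getD_insert_self] at hnil
            have hcc : PySem.Set.contains deleted k ≠ false := fun hb => hc ⟨hnil, hb⟩
            rw [hpk]
            exact pv_mem_of_contains_ne_false hcc
          · rw [PySem.Dict.getD_insert_of_ne _ _ _ hpk] at hnil
            exact h7 p hp hnil)
        h8 h9
      rw [List.append_cons done k ks]
      exact hres
  -- end relax

-- ---------- B side: main loop ----------

theorem pv_kahn_spec (items : List (Int × List Int)) (hnk : (items.map (·.1)).Nodup)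
    (dep : PySem.Dict Int (List Int))
    (hdep : ∀ x k, k ∈ dep.getD x [] ↔ ∃ p ∈ items, p.1 = k ∧ x ∈ p.2) (bn : Int) :
    ∀ (f : Nat) (Q : List Int) (pd : PySem.Dict Int (PySem.Set Int)) (deleted : PySem.Set Int)
      (stack : List Int),
    Q.Nodup → deleted.Nodup → stack.Nodup →
    (∀ y, y ∈ deleted ↔ (y ∈ Q ∨ y ∈ stack)) →
    (∀ y ∈ Q, y ∉ stack) →
    (∀ p ∈ items, ∀ y, y ∈ pd.getD p.1 [] ↔ (y ∈ p.2 ∧ y ∉ Q)) →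
    (∀ p ∈ items, pd.getD p.1 [] = [] → p.1 ∈ deleted) →
    (∀ T, ClosedU items T → bn ∈ T → ∀ y ∈ deleted, y ∈ T) →
    (∀ y ∈ deleted, y = bn ∨ y ∈ items.map (·.1)) →
    items.length + 2 ≤ f + Q.length →
    (pvKahn dep f pd deleted stack).Nodup ∧
    (∀ y ∈ deleted, y ∈ pvKahn dep f pd deleted stack) ∧
    ClosedU items (pvKahn dep f pd deleted stack) ∧
    (∀ T, ClosedU items T → bn ∈ T → ∀ y ∈ pvKahn dep f pd deleted stack, y ∈ T) := by
  intro f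
  induction f with
  | zero =>
    intro Q pd deleted stack hQ h1 h2 h3 h4 _ _ _ h9 hf
    exfalso
    have hsub : ∀ y ∈ Q, y ∈ bn :: items.map (·.1) := by
      intro y hy
      rcases h9 y ((h3 y).2 (Or.inl hy)) with h | h
      · simp [h]
      · exact List.mem_cons_of_mem _ h
    have hle := (List.subperm_of_subset hQ hsub).length_le
    simp only [List.length_cons, List.length_map] at hle
    omega
  | succ f ih =>
    intro Q pd deleted stack hQ h1 h2 h3 h4 h6 h7 h8 h9 hf
    by_cases hne : stack = []
    · have hr : pvKahn dep (f+1) pd deleted stack = deleted := by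
        unfold pvKahn
        rw [dif_pos hne]
      rw [hr]
      refine ⟨h1, fun y hy => hy, ?_, fun T hT hbnT y hy => h8 T hT hbnT y hy⟩
      intro p hp hpsub
      apply h7 p hp
      rw [List.eq_nil_iff_forall_not_mem]
      intro y hy
      rw [h6 p hp y] at hy
      have : y ∈ deleted := hpsub y hy.1
      rw [h3 y] at this
      rcases this with h | h
      · exact hy.2 h
      · rw [hne] at h; simp at h
    · have hr : pvKahn dep (f+1) pd deleted stack =
          pvKahn dep f (pvRelax (stack.getLast hne) (dep.getD (stack.getLast hne) []) pd deleted stack.dropLast).1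
            (pvRelax (stack.getLast hne) (dep.getD (stack.getLast hne) []) pd deleted stack.dropLast).2.1
            (pvRelax (stack.getLast hne) (dep.getD (stack.getLast hne) []) pd deleted stack.dropLast).2.2 := by
        rw [show pvKahn dep (f+1) pd deleted stack =
          (if h : stack = [] then deleted
           else pvKahn dep f
             (pvRelax (stack.getLast h) (dep.getD (stack.getLast h) []) pd deleted stack.dropLast).1
             (pvRelax (stack.getLast h) (dep.getD (stack.getLast h) []) pd deleted stack.dropLast).2.1
             (pvRelax (stack.getLast h) (dep.getD (stack.getLast h) []) pd deleted stack.dropLast).2.2) from rfl]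
        rw [dif_neg hne]
      set x := stack.getLast hne with hxdef
      have hsplit : stack.dropLast ++ [x] = stack := List.dropLast_append_getLast hne
      have hxmem : x ∈ stack := by
        rw [← hsplit]; simp
      have hstack0 : stack.dropLast.Nodup :=
        (List.dropLast_sublist stack).nodup h2
      have hxnot0 : x ∉ stack.dropLast := by
        intro hx
        have h2' := h2
        rw [← hsplit, List.nodup_append] at h2'
        exact h2'.2.2 x hx x (by simp) rfl
      have hxQ : x ∉ Q := fun hq => h4 x hq hxmem
      have hks : ∀ k ∈ dep.getD x [], ∃ v, (k, v) ∈ items ∧ x ∈ v := by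
        intro k hk
        obtain ⟨p, hp, hpk, hpx⟩ := (hdep x k).1 hk
        refine ⟨p.2, ?_, hpx⟩
        rw [← hpk]
        exact hp
      have hstackiff : ∀ y, y ∈ stack ↔ (y = x ∨ y ∈ stack.dropLast) := by
        intro y
        conv_lhs => rw [← hsplit]
        simp only [List.mem_append, List.mem_singleton]
        tauto
      obtain ⟨r1, r2, r3, r4, r5, r6, r7, r8, r9, r10⟩ :=
        pv_relax_spec items hnk x bn Q (dep.getD x []) [] pd deleted stack.dropLast
          hks h1 hstack0
          (by
            intro y
            rw [h3 y, hstackiff y])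
          (by
            intro y hy
            intro hcon
            exact h4 y hy ((hstackiff y).2 hcon))
          hxnot0
          (by
            intro p hp y
            rw [h6 p hp y]
            constructor
            · rintro ⟨hy1, hy2⟩
              exact ⟨hy1, hy2, fun hh => by simp at hh⟩
            · rintro ⟨hy1, hy2, _⟩
              exact ⟨hy1, hy2⟩)
          h7 h8 h9
      rw [hr]
      have hQ' : (Q ++ [x]).Nodup := by
        rw [List.nodup_append]
        refine ⟨hQ, List.nodup_singleton _, ?_⟩
        intro a ha b hb
        simp only [List.mem_singleton] at hb
        subst hb
        exact fun he => hxQ (he ▸ ha)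
      obtain ⟨s1, s2, s3, s4⟩ := ih (Q ++ [x]) _ _ _
        hQ' r1 r2
        (by
          intro y
          rw [r3 y]
          simp only [List.mem_append, List.mem_singleton]
          tauto)
        (by
          intro y hy
          simp only [List.mem_append, List.mem_singleton] at hy
          rcases hy with hy | hy
          · exact fun hs => r4 y hy (Or.inr hs)
          · exact hy ▸ r5)
        (by
          intro p hp y
          rw [r6 p hp y]
          simp only [List.nil_append, List.mem_append, List.mem_singleton]
          constructor
          · rintro ⟨hy1, hy2, hy3⟩
            refine ⟨hy1, ?_⟩
            rintro (hq | hyx)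
            · exact hy2 hq
            · exact hy3 ⟨hyx, (hdep x p.1).2 ⟨p, hp, rfl, hyx ▸ hy1⟩⟩
          · rintro ⟨hy1, hy2⟩
            exact ⟨hy1, fun hq => hy2 (Or.inl hq), fun hh => hy2 (Or.inr hh.1)⟩)
        r7 r8 r9
        (by simp only [List.length_append, List.length_singleton]; omega)
      exact ⟨s1, fun y hy => s2 y (r10 y hy), s3, s4⟩

-- ===== VERDICT (by name: the statement is the Claim_ definition above) =====
theorem find_collapse_spec : Claim_equal_find_collapse := by
  unfold Claim_equal_find_collapse
  intro bn needs _
  unfold Spec_find_collapse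
  show PySem.Set.len (pvLoopA (PySem.Dict.ofList needs).items ((PySem.Dict.ofList needs).items.length + 2) 0 (PySem.Set.ofList [bn])) - 1 = _
  set items := (PySem.Dict.ofList needs).items with hitems
  have hnk : (items.map (·.1)).Nodup := by
    have := PySem.Dict.nodup_keys_ofList (ps := needs) (κ := Int) (ν := List Int)
    simpa [PySem.Dict.keys] using this
  have hof : PySem.Set.ofList [bn] = [bn] := rfl
  -- A side
  obtain ⟨a1, a2, a3, a4⟩ := pv_loopA_spec items bn (items.length + 2) 0 (PySem.Set.ofList [bn])
    (by rw [hof]; exact List.nodup_singleton _)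
    (by rw [hof]; intro y hy; simp only [List.mem_singleton] at hy; simp [hy])
    (by intro habs; rw [hof] at habs; unfold PySem.Set.len at habs; simp at habs)
    (by rw [hof]; simp)
  -- B side facts
  have hbi : (pvBuild items).1.items = items.map (fun p => (p.1, PySem.Set.ofList p.2)) :=
    pv_build_fst_items items hnk
  have hbk : (pvBuild items).1.keys.Nodup := by
    have : (pvBuild items).1.keys = items.map (·.1) := by
      show (pvBuild items).1.items.map (·.1) = items.map (·.1)
      rw [hbi, List.map_map]
      rfl
    rw [this]; exact hnk
  have hgetD : ∀ p ∈ items, (pvBuild items).1.getD p.1 [] = PySem.Set.ofList p.2 := by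
    intro p hp
    exact PySem.Dict.getD_of_mem_items _
      (by rw [hbi]; exact List.mem_map.2 ⟨p, hp, rfl⟩) hbk []
  obtain ⟨e1, e2, e3, e4, e5⟩ := pv_seed_aux ((pvBuild items).1.items) [bn] [bn] rfl
    (List.nodup_singleton _)
  have hseed : pvSeed bn (pvBuild items).1.items =
      ((pvBuild items).1.items.foldl pvSeedF ([bn], [bn])) := by
    unfold pvSeed
    rw [hof]
  set sd := (pvBuild items).1.items.foldl pvSeedF ([bn], [bn]) with hsd
  have hbnsd : bn ∈ sd.1 := e3 bn (by simp)
  have hsd9 : ∀ y ∈ sd.1, y = bn ∨ y ∈ items.map (·.1) := by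
    intro y hy
    rcases e5 y hy with h | ⟨q, hq, hyq, _⟩
    · simp only [List.mem_singleton] at h; exact Or.inl h
    · right
      rw [hbi] at hq
      obtain ⟨p, hp, rfl⟩ := List.mem_map.1 hq
      exact hyq ▸ List.mem_map.2 ⟨p, hp, rfl⟩
  have hsd8 : ∀ T, ClosedU items T → bn ∈ T → ∀ y ∈ sd.1, y ∈ T := by
    intro T hT hbnT y hy
    rcases e5 y hy with h | ⟨q, hq, hyq, hq2⟩
    · simp only [List.mem_singleton] at h; exact h ▸ hbnT
    · rw [hbi] at hq
      obtain ⟨p, hp, rfl⟩ := List.mem_map.1 hq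
      subst hyq
      apply hT p hp
      intro z hz
      exfalso
      have hzz : z ∈ PySem.Set.ofList p.2 := (PySem.Set.mem_ofList _ _).2 hz
      have hq2' : PySem.Set.ofList p.2 = [] := hq2
      rw [hq2'] at hzz
      simp at hzz
  obtain ⟨b1, b2, b3, b4⟩ := pv_kahn_spec items hnk (pvBuild items).2
    (fun x k => pv_dep_mem items x k) bn
    (items.length + 2) [] (pvBuild items).1 sd.1 sd.2
    (List.nodup_nil) e2 (e1 ▸ e2)
    (by intro y; rw [← e1]; simp)
    (by simp)
    (by
      intro p hp y
      rw [hgetD p hp]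
      simp [PySem.Set.mem_ofList])
    (by
      intro p hp hnil
      apply e4 (p.1, PySem.Set.ofList p.2)
      · rw [hbi]; exact List.mem_map.2 ⟨p, hp, rfl⟩
      · rw [← hgetD p hp]; exact hnil)
    hsd8 hsd9
    (by simp)
  -- combine
  have hClosedA : ClosedU items (pvLoopA items (items.length + 2) 0 (PySem.Set.ofList [bn])) :=
    fun p hp hsub => pv_sweepA_fix_closed items _ a3 p hp hsub
  have hbnA : bn ∈ pvLoopA items (items.length + 2) 0 (PySem.Set.ofList [bn]) :=
    a2 bn (by rw [hof]; simp)
  have hiff : ∀ y, y ∈ pvLoopA items (items.length + 2) 0 (PySem.Set.ofList [bn]) ↔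
      y ∈ pvKahn (pvBuild items).2 (items.length + 2) (pvBuild items).1 sd.1 sd.2 := by
    intro y
    constructor
    · intro hy
      exact a4 _ b3 (by
        rw [hof]
        intro z hz
        simp only [List.mem_singleton] at hz
        rw [hz]
        exact b2 bn hbnsd) y hy
    · intro hy
      exact b4 _ hClosedA hbnA y hy
  have hperm := (List.perm_ext_iff_of_nodup a1 b1).2 hiff
  have hlen := hperm.length_eq
  show PySem.Set.len (pvLoopA items (items.length + 2) 0 (PySem.Set.ofList [bn])) - 1 =
    PySem.Set.len (pvKahn (pvBuild items).2 (items.length + 2) (pvBuild items).1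
      (pvSeed bn (pvBuild items).1.items).1 (pvSeed bn (pvBuild items).1.items).2) - 1
  rw [hseed]
  unfold PySem.Set.len
  rw [hlen]
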